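-- pv_equiv track=rewrite | github.com/Aryan-x677/AI_Evaluation_pipeline | src/utils.py | get_latest_turn
-- ===== SOURCE A (Python) =====
-- def get_latest_turn(chat_data):
--     messages = chat_data.get("conversation_turns", [])
--
--     user_query = None
--     assistant_answer = None
--
--     for msg in reversed(messages):
--         role = msg.get("role")
--
--         if role == "AI/Chatbot" and assistant_answer is None:
--             assistant_answer = msg.get("message")
--         elif role == "User" and assistant_answer is not None:
--             user_query = msg.get("message")
--             break
--
--     return user_query, assistant_answer
-- ===== SOURCE B (Python) =====
-- def get_latest_turn(chat_data):
--     rev = list(reversed(chat_data.get("conversation_turns", [])))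
--     for i, t in enumerate(rev):
--         if t.get("role") == "AI/Chatbot" and t.get("message") is not None:
--             users = [u.get("message") for u in rev[i + 1:] if u.get("role") == "User"]
--             return (users[0] if users else None), t.get("message")
--     return None, None
-- ===== Notes on version B (the rewrite author's own statement) =====
-- stated objective: simpler
-- what changed: Replaced A's stateful reverse loop (threading user_query/assistant_answer with a break) by a stateless scan that stops at the first answered AI turn from the end and then extracts the preceding user message with a separate comprehension over the remaining tail, returning directly.
import Mathlib
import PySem

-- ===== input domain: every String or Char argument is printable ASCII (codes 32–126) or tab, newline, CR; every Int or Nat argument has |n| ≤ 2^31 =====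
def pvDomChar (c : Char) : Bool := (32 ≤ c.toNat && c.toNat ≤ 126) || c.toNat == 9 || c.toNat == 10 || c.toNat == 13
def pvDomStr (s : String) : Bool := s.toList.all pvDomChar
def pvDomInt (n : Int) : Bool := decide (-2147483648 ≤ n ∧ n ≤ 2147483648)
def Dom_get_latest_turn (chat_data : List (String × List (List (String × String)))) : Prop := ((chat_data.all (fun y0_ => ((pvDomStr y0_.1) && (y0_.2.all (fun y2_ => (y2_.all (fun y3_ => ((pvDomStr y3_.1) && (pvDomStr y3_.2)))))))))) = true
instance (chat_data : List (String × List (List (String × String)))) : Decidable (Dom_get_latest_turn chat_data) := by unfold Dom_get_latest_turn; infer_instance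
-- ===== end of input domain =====

-- B replaces A's stateful reverse loop with break by a stateless scan to the first answered
-- AI turn from the end plus a separate comprehension over the tail (simpler decomposition).
-- ===== PORT A =====
-- dict lookup (association list, first match) — A's msg.get(k)
def pvGet (d : List (String × String)) (k : String) : Option String :=
  (d.find? (fun p => p.1 == k)).map (·.2)

def pvTurns (chat_data : List (String × List (List (String × String)))) : List (List (String × String)) :=
  ((chat_data.find? (fun p => p.1 == "conversation_turns")).map (·.2)).getD []

-- A's reversed loop, threading (user_query, assistant_answer); `break` returns immediately
def aLoop : List (List (String × String)) → Option String × Option String → Option String × Option String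
  | [], st => st
  | msg :: rest, (uq, aa) =>
    if pvGet msg "role" = some "AI/Chatbot" ∧ aa = none then
      aLoop rest (uq, pvGet msg "message")
    else if pvGet msg "role" = some "User" ∧ aa ≠ none then
      (pvGet msg "message", aa)   -- break
    else
      aLoop rest (uq, aa)

def get_latest_turn (chat_data : List (String × List (List (String × String)))) : Option String × Option String :=
  aLoop (pvTurns chat_data).reverse (none, none)

-- ===== PORT B =====
-- B's t.get(k): same association-list lookup, written as its own recursion
def bGet : List (String × String) → String → Option String
  | [], _ => none
  | (k', v) :: rest, k => if k' == k then some v else bGet rest k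

-- the comprehension [u.get("message") for u in tail if u.get("role") == "User"]
def bUsers (tail : List (List (String × String))) : List (Option String) :=
  tail.filterMap (fun u => if bGet u "role" == some "User" then some (bGet u "message") else none)

-- B's for-loop over the reversed list: return at the first answered AI turn
def bScan : List (List (String × String)) → Option String × Option String
  | [] => (none, none)
  | t :: rest =>
    if bGet t "role" == some "AI/Chatbot" && (bGet t "message").isSome then
      ((bUsers rest).head?.getD none, bGet t "message")
    else
      bScan rest

def get_latest_turn_alt (chat_data : List (String × List (List (String × String)))) : Option String × Option String :=
  bScan (((chat_data.find? (fun p => p.1 == "conversation_turns")).map (·.2)).getD []).reverse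

-- ===== PRECONDITION & SPEC =====
def Spec_get_latest_turn (chat_data : List (String × List (List (String × String)))) (out : Option String × Option String) : Prop := out = get_latest_turn_alt chat_data
instance (chat_data : List (String × List (List (String × String)))) (out : Option String × Option String) : Decidable (Spec_get_latest_turn chat_data out) := by unfold Spec_get_latest_turn; infer_instance

-- ===== CLAIM =====
def Claim_equal_get_latest_turn : Prop := ∀ (chat_data : List (String × List (List (String × String)))), Dom_get_latest_turn chat_data → Spec_get_latest_turn chat_data (get_latest_turn chat_data)

-- ===== LEMMAS AND PROOFS =====
theorem bGet_eq_pvGet (d : List (String × String)) (k : String) : bGet d k = pvGet d k := by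
  induction d with
  | nil => simp [bGet, pvGet]
  | cons p rest ih =>
    obtain ⟨k', v⟩ := p
    by_cases h : k' == k <;> simp [bGet, pvGet, List.find?, h] <;> simpa [pvGet] using ih

-- once assistant_answer is some v, A's loop returns the first User message of the rest
theorem aLoop_some (l : List (List (String × String))) (uq : Option String) (v : String) :
    aLoop l (uq, some v) = ((bUsers l).head?.getD uq, some v) := by
  induction l generalizing uq with
  | nil => simp [aLoop, bUsers]
  | cons m rest ih =>
    by_cases hU : pvGet m "role" = some "User"
    · simp [aLoop, hU, bUsers, bGet_eq_pvGet]
    · by_cases hA : pvGet m "role" = some "AI/Chatbot" <;>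
        simp [aLoop, hU, hA, bUsers, bGet_eq_pvGet, ih]

theorem aLoop_eq_bScan (l : List (List (String × String))) :
    aLoop l (none, none) = bScan l := by
  induction l with
  | nil => rfl
  | cons t rest ih =>
    by_cases hA : pvGet t "role" = some "AI/Chatbot"
    · cases hm : pvGet t "message" with
      | none =>
        simp [aLoop, bScan, hA, bGet_eq_pvGet, hm, ih]
      | some v =>
        simp [aLoop, bScan, hA, bGet_eq_pvGet, hm, aLoop_some]
    · have hA' : ¬ (bGet t "role" == some "AI/Chatbot") = true := by
        simp [bGet_eq_pvGet, hA]
      by_cases hU : pvGet t "role" = some "User" <;>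
        simp [aLoop, bScan, hA, hU, hA', ih]

-- ===== VERDICT =====
theorem get_latest_turn_spec : Claim_equal_get_latest_turn := by
  intro chat_data _
  unfold Spec_get_latest_turn get_latest_turn get_latest_turn_alt pvTurns
  exact aLoop_eq_bScan _
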